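-- pv_equiv track=rewrite | github.com/jasivan/FERMAT | T5_code/char_level_rep.py | char_level_representation_impl
-- ===== SOURCE A (Python) =====
-- from typing import Tuple, List
--
-- def char_level_representation_impl(text:list) -> Tuple[List[str], List[tuple]]:
--     '''
--         Method for splitting all numbers in a tokenized text which are larger
--         than one digit. Also removes the artificial '[F]'
--         :param text: a tokenized text
--         :return: the same tokenized text but with digit-by-digit tokenization
--             and the indices of splitted numbers in the table
--     '''
--
--     # find all indices of '[F]', enclosing the numbers of the table
--     # and pair consecutive indices into tuples (e. g. [(91, 95), (101, 105), ...])
--     num_indices = [i for i, _ in enumerate(text) if _ == '[F]']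
--     num_indices = list(zip(num_indices[::2], num_indices[1::2]))
--
--     # only run this code if there were actually tokens splitted
--     if len(num_indices) > 0:
--
--         # initialize the splitted text with the part of the table preceding the numbers
--         splitted_text = text[:num_indices[0][0]]
--
--         # init the list for the indices of splitted numbers
--         splitted_indices = []
--
--         # now do two different things: tokenize numbers digit-by-digit and add the them and text
--         # between them to splitted_text
--         for i, num_indice in enumerate(num_indices):
--
--             # decompose the span described by num_indice into single characters
--             # (+1 to ignore the leading '[F]')
--             splitted = list(''.join(text[num_indice[0]+1:num_indice[1]]))
--
--             # here, the word beginning token (\0120) is concatenated with the first digit to represent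
--             # the start of a word; if the splitted number consists of more than two characters,
--             # they are added as additional elements
--             splitted = [''.join(splitted[:2])] + splitted[2:] if len(splitted) > 2 \
--                 else [''.join(splitted[:2])]
--
--             # add as indice for splitted number the current lenght of splitted_text as start
--             # position and this + the length of splitted as end position
--             splitted_indices.append((len(splitted_text), len(splitted_text) + len(splitted)))
--
--             # extend the splitted text with the now splitted number
--             splitted_text.extend(splitted)
--
--             if i + 1 < len(num_indices):
--
--                 # if there are more numbers to be decomposed, extend the splitted text with the part
--                 # between the current number and the next number
--                 splitted_text.extend(text[num_indice[1] + 1:num_indices[i+1][0]])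
--
--         # extend the splitted text with the remaining parts of the original tokenized text
--         # (e. g. the caption)
--         splitted_text.extend(text[num_indices[-1][1] + 1:])
--
--     else:
--         splitted_text = text
--
--     # the strip is necessary to avoid <unk> tokens afterwards
--     return [t.strip() for t in splitted_text], splitted_indices if len(num_indices) > 0 else []
-- ===== SOURCE B (Python) =====
-- def char_level_representation_impl(text):
--     # Single incremental scan: repeatedly find the next pair of '[F]' markers
--     # and splice in the digit-by-digit tokens, instead of precomputing all
--     # marker indices and pairing them with zip.
--     out, idx = [], []
--     rest = text
--     while '[F]' in rest:
--         i = rest.index('[F]')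
--         tail = rest[i + 1:]
--         if '[F]' not in tail:
--             break  # trailing unpaired marker: remainder is copied verbatim
--         j = tail.index('[F]')
--         out += rest[:i]
--         chars = list(''.join(tail[:j]))
--         tok = [''.join(chars[:2])] + chars[2:]
--         idx.append((len(out), len(out) + len(tok)))
--         out += tok
--         rest = tail[j + 1:]
--     out += rest
--     return [t.strip() for t in out], idx
-- ===== Notes on version B (the rewrite author's own statement) =====
-- stated objective: simpler
-- what changed: Replaces A's precomputed enumerate/zip-paired '[F]' index table, absolute-index slicing loop with lookahead, and separate final-tail append by one incremental while-loop that repeatedly finds the next pair of markers in the remaining suffix and splices tokens in as it goes.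
import Mathlib
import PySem

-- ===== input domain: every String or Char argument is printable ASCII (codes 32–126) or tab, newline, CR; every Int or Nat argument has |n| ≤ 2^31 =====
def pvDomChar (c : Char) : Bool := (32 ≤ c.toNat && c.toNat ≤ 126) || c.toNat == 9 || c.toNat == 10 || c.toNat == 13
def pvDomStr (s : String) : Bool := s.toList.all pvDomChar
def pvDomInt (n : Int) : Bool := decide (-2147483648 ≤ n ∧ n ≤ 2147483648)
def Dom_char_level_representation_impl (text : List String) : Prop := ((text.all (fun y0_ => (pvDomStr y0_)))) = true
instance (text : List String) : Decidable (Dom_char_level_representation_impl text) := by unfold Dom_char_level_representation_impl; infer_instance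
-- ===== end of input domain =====

-- B replaces A's precomputed zip-paired '[F]' index table and absolute-index loop by a single
-- incremental scan that repeatedly finds the next marker pair in the remaining suffix (objective:
-- simpler; same return value).

-- ===== PORT A =====
-- [i for i, _ in enumerate(text) if _ == '[F]']
def pvMarkersA (text : List String) : List Int :=
  ((PySem.List.enumerate text 0).filter (fun p => p.2 == "[F]")).map (fun p => p.1)

-- list(zip(num_indices[::2], num_indices[1::2])); step 2 ≠ 0 so slice? is always `some`
def pvPairsA (text : List String) : List (Int × Int) :=
  List.zip ((PySem.List.slice? (pvMarkersA text) none none 2).getD [])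
           ((PySem.List.slice? (pvMarkersA text) (some 1) none 2).getD [])

-- the for-loop over enumerate(num_indices); the digit list `splitted` (Python 1-char strings) is
-- carried as List Char and wrapped into Strings where Python joins/keeps them (exact on all inputs)
def pvLoopA (text : List String) : List (Int × Int) → List String → List (Int × Int) →
    List String × List (Int × Int)
  | [], st, acc => (st, acc)
  | (a, b) :: rest, st, acc =>
    let chars := (PySem.Str.join "" (PySem.List.slice text (some (a + 1)) (some b))).toList
    let splitted : List String :=
      if chars.length > 2 then String.ofList (chars.take 2) :: (chars.drop 2).map (fun c => String.ofList [c])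
      else [String.ofList (chars.take 2)]
    let acc' := acc ++ [((st.length : Int), (st.length : Int) + (splitted.length : Int))]
    let st' := st ++ splitted
    match rest with
    | [] => (st', acc')
    | (a2, _) :: _ => pvLoopA text rest (st' ++ PySem.List.slice text (some (b + 1)) (some a2)) acc'

def char_level_representation_impl (text : List String) : List String × (List (Int × Int)) :=
  match pvPairsA text with
  | [] => (text.map PySem.Str.strip, [])
  | p :: ps =>
    let r := pvLoopA text (p :: ps) (PySem.List.slice text none (some p.1)) []
    ((r.1 ++ PySem.List.slice text (some (((p :: ps).getLast (by simp)).2 + 1)) none).map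
        PySem.Str.strip,
      r.2)

-- ===== PORT B =====
-- the while-loop of Source B: scan the remaining suffix `rest`, splicing in each completed marker pair
def pvScanB (rest out : List String) (idx : List (Int × Int)) : List String × List (Int × Int) :=
  match h1 : PySem.List.index? rest "[F]" with
  | none => (out ++ rest, idx)            -- '[F]' not in rest
  | some i =>
    let tail := PySem.List.slice rest (some ((i : Int) + 1)) none
    match PySem.List.index? tail "[F]" with
    | none => (out ++ rest, idx)          -- break: trailing unpaired marker, remainder verbatim
    | some j =>
      let out' := out ++ PySem.List.slice rest none (some (i : Int))
      let chars := (PySem.Str.join "" (PySem.List.slice tail none (some (j : Int)))).toList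
      let tok : List String := String.ofList (chars.take 2) :: (chars.drop 2).map (fun c => String.ofList [c])
      let idx' := idx ++ [((out'.length : Int), (out'.length : Int) + (tok.length : Int))]
      pvScanB (PySem.List.slice tail (some ((j : Int) + 1)) none) (out' ++ tok) idx'
  termination_by rest.length
  decreasing_by
    have hmem : "[F]" ∈ rest := (PySem.List.index?_isSome_iff rest "[F]").1 (by rw [h1]; rfl)
    have hne : rest ≠ [] := by rintro rfl; simp at hmem
    have h1' : PySem.List.slice rest (some ((i : Int) + 1)) none = rest.drop (i + 1) := by
      rw [show ((i : Int) + 1) = ((i + 1 : Nat) : Int) by push_cast; ring,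
        PySem.List.slice_from_natCast]
    have h2' : PySem.List.slice (PySem.List.slice rest (some ((i : Int) + 1)) none)
        (some ((j : Int) + 1)) none
        = (PySem.List.slice rest (some ((i : Int) + 1)) none).drop (j + 1) := by
      rw [show ((j : Int) + 1) = ((j + 1 : Nat) : Int) by push_cast; ring,
        PySem.List.slice_from_natCast]
    rw [h2', h1']
    have : 0 < rest.length := List.length_pos_iff.2 hne
    simp only [List.length_drop]
    omega

def char_level_representation_impl_alt (text : List String) : List String × (List (Int × Int)) :=
  let r := pvScanB text [] []
  (r.1.map PySem.Str.strip, r.2)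

-- ===== PRECONDITION & SPEC =====
def Spec_char_level_representation_impl (text : List String) (out : List String × (List (Int × Int))) : Prop := out = char_level_representation_impl_alt text
instance (text : List String) (out : List String × (List (Int × Int))) : Decidable (Spec_char_level_representation_impl text out) := by unfold Spec_char_level_representation_impl; infer_instance

-- ===== CLAIM (what is proved, stated in full; the proofs are below) =====
def Claim_equal_char_level_representation_impl : Prop := ∀ (text : List String), Dom_char_level_representation_impl text → Spec_char_level_representation_impl text (char_level_representation_impl text)

-- ===== LEMMAS AND PROOFS =====

-- proof-side structural views --------------------------------------------------------------------

/-- positions of "[F]" in a token list, structurally -/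
def pvMarks : List String → List Nat
  | [] => []
  | x :: xs => if x = "[F]" then 0 :: (pvMarks xs).map (· + 1) else (pvMarks xs).map (· + 1)

/-- consecutive pairing, structurally -/
def pvPairUp {α : Type} : List α → List (α × α)
  | a :: b :: r => (a, b) :: pvPairUp r
  | _ => []

def pvEvens {α : Type} : List α → List α
  | [] => []
  | [a] => [a]
  | a :: _ :: r => a :: pvEvens r

def pvOdds {α : Type} : List α → List α
  | [] => []
  | [_] => []
  | _ :: b :: r => b :: pvOdds r

/-- the token block both programs build from the joined span -/
def pvTokOf (v : List String) : List String :=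
  let chars := (PySem.Str.join "" v).toList
  String.ofList (chars.take 2) :: (chars.drop 2).map (fun c => String.ofList [c])

/-- shift both components of recorded index pairs -/
def pvShift (k : Int) (l : List (Int × Int)) : List (Int × Int) :=
  l.map (fun e => (e.1 + k, e.2 + k))

/-- the `splitted` block A builds for one pair (a, b) -/
def pvSpl (w : List String) (a b : Int) : List String :=
  let chars := (PySem.Str.join "" (PySem.List.slice w (some (a + 1)) (some b))).toList
  if chars.length > 2 then String.ofList (chars.take 2) :: (chars.drop 2).map (fun c => String.ofList [c])
  else [String.ofList (chars.take 2)]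

/-- A's pre-strip core -/
def pvACore (text : List String) : List String × List (Int × Int) :=
  match pvPairsA text with
  | [] => (text, [])
  | p :: ps =>
    let r := pvLoopA text (p :: ps) (PySem.List.slice text none (some p.1)) []
    (r.1 ++ PySem.List.slice text (some (((p :: ps).getLast (by simp)).2 + 1)) none, r.2)

-- lemmas -----------------------------------------------------------------------------------------

lemma markersA_gen (t : List String) : ∀ s : Int,
    ((PySem.List.enumerate t s).filter (fun p => p.2 == "[F]")).map (fun p => p.1)
      = (pvMarks t).map (fun n : Nat => s + (n : Int)) := by
  induction t with
  | nil => intro s; simp [PySem.List.enumerate_nil, pvMarks]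
  | cons x xs ih =>
    intro s
    rw [PySem.List.enumerate_cons, List.filter_cons]
    by_cases hx : x = "[F]"
    · rw [if_pos (by simp [hx])]
      rw [List.map_cons, ih (s + 1), pvMarks, if_pos hx, List.map_cons, List.map_map]
      refine congrArg₂ _ (by ring_nf) (List.map_congr_left ?_)
      intro n _; simp [Function.comp]; ring
    · rw [if_neg (by simp [hx])]
      rw [ih (s + 1), pvMarks, if_neg hx, List.map_map]
      refine List.map_congr_left ?_
      intro n _; simp [Function.comp]; ring

lemma markersA_eq (t : List String) :
    pvMarkersA t = (pvMarks t).map (fun n : Nat => (n : Int)) := by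
  have h := markersA_gen t 0
  rw [pvMarkersA, h]
  exact List.map_congr_left (fun n _ => by ring)

lemma slice?_evens {α : Type} (l : List α) :
    PySem.List.slice? l none none 2 = some (pvEvens l) := by
  induction l using pvEvens.induct with
  | case1 => rfl
  | case2 a => simp [PySem.List.slice?, PySem.List.sliceIndices, pvEvens]
  | case3 a b r ih =>
    simp only [PySem.List.slice?, PySem.List.sliceIndices] at ih ⊢
    norm_num at ih ⊢
    have hc1 : (if 0 < r.length then (((r.length : Int) + 2 - 1) / 2).toNat else 0)
        = (((r.length : Int) + 1) / 2).toNat := by split <;> omega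
    have hcg : (if (0:Int) ≤ (r.length : Int) + 1 then (((r.length : Int) + 1 + 1 + 2 - 1) / 2).toNat else 0)
        = (((r.length : Int) + 1) / 2).toNat + 1 := by split <;> omega
    rw [hc1] at ih
    rw [hcg, List.range_succ_eq_map, List.filterMap_cons, List.filterMap_map]
    norm_num
    rw [pvEvens, ← ih]
    refine congrArg _ (List.filterMap_congr (fun k _ => ?_))
    have h1 : (2 * ((k : Int) + 1)).toNat = 2 * k + 2 := by omega
    have h2 : (2 * (k : Int)).toNat = 2 * k := by omega
    norm_num [h1, h2]

lemma pvOdds_cons {α : Type} (a : α) (t : List α) : pvOdds (a :: t) = pvEvens t := by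
  induction t using pvEvens.induct generalizing a with
  | case1 => rfl
  | case2 b => rfl
  | case3 b c r ih => rw [pvEvens, ← ih c]; rfl

lemma slice?_odds {α : Type} (l : List α) :
    PySem.List.slice? l (some 1) none 2 = some (pvOdds l) := by
  cases l with
  | nil => rfl
  | cons a t =>
    rw [pvOdds_cons, ← slice?_evens t]
    simp only [PySem.List.slice?, PySem.List.sliceIndices]
    norm_num
    refine List.filterMap_congr (fun k _ => ?_)
    have h1 : (1 + 2 * (k : Int)).toNat = 2 * k + 1 := by omega
    have h2 : (2 * (k : Int)).toNat = 2 * k := by omega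
    norm_num [h1, h2]

lemma zip_evens_odds {α : Type} (l : List α) :
    List.zip (pvEvens l) (pvOdds l) = pvPairUp l := by
  induction l using pvPairUp.induct with
  | case1 a b r ih => rw [pvEvens, pvOdds, pvPairUp, List.zip_cons_cons, ih]
  | case2 t h =>
    match t, h with
    | [], _ => rfl
    | [a], _ => rfl
    | a :: b :: r, h => exact absurd rfl (fun hh => h a b r hh)

lemma pvPairUp_map {α β : Type} (f : α → β) (l : List α) :
    pvPairUp (l.map f) = (pvPairUp l).map (fun ab => (f ab.1, f ab.2)) := by
  induction l using pvPairUp.induct with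
  | case1 a b r ih => simp [pvPairUp, ih]
  | case2 t h =>
    match t, h with
    | [], _ => rfl
    | [a], _ => rfl
    | a :: b :: r, h => exact absurd rfl (fun hh => h a b r hh)

lemma pairsA_eq (t : List String) :
    pvPairsA t = (pvPairUp (pvMarks t)).map
      (fun ab => ((ab.1 : Int), (ab.2 : Int))) := by
  rw [pvPairsA, slice?_evens, slice?_odds, markersA_eq]
  show List.zip (pvEvens _) (pvOdds _) = _
  rw [zip_evens_odds, pvPairUp_map]

lemma pvMarks_nil_iff (t : List String) : pvMarks t = [] ↔ "[F]" ∉ t := by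
  induction t with
  | nil => simp [pvMarks]
  | cons x xs ih =>
    by_cases hx : x = "[F]"
    · simp [pvMarks, hx]
    · simp [pvMarks, hx, ih]
      exact fun _ h2 => hx h2.symm

lemma pvMarks_decomp (t : List String) : ∀ p m, pvMarks t = p :: m →
    ∃ u t', t = u ++ "[F]" :: t' ∧ "[F]" ∉ u ∧ u.length = p ∧
      m = (pvMarks t').map (· + (p + 1)) := by
  induction t with
  | nil => intro p m h; simp [pvMarks] at h
  | cons x xs ih =>
    intro p m h
    by_cases hx : x = "[F]"
    · rw [pvMarks, if_pos hx] at h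
      obtain ⟨hp, hm⟩ := List.cons.inj h
      exact ⟨[], xs, by simp [hx], by simp, by simp [← hp], by simpa [← hp] using hm.symm⟩
    · rw [pvMarks, if_neg hx] at h
      obtain ⟨p', m', hmk, hp', hm'⟩ := List.map_eq_cons_iff.1 h
      obtain ⟨u, t', ht, hu, hlen, hmrel⟩ := ih p' m' hmk
      refine ⟨x :: u, t', by simp [ht], by simp [hu]; exact fun h2 => hx h2.symm, by simp; omega, ?_⟩
      rw [← hm', hmrel, List.map_map]
      refine List.map_congr_left (fun n _ => ?_)
      simp [Function.comp]; omega

lemma index?_prefix (u t' : List String) (hu : "[F]" ∉ u) :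
    PySem.List.index? (u ++ "[F]" :: t') "[F]" = some u.length :=
  (PySem.List.index?_eq_some_iff _ _ _).2 ⟨u, t', rfl, rfl, hu⟩

lemma tok_collapse (c : List Char) :
    (if c.length > 2 then String.ofList (c.take 2) :: (c.drop 2).map (fun ch => String.ofList [ch])
      else [String.ofList (c.take 2)])
    = String.ofList (c.take 2) :: (c.drop 2).map (fun ch => String.ofList [ch]) := by
  split
  · rfl
  · rename_i h
    have : c.drop 2 = [] := List.drop_eq_nil_iff.2 (by omega)
    simp [this]








lemma loopA_single (w : List String) (a b : Int) (st : List String) (acc : List (Int × Int)) :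
    pvLoopA w [(a, b)] st acc
      = (st ++ pvSpl w a b, acc ++ [((st.length : Int), (st.length : Int) + ((pvSpl w a b).length : Int))]) := rfl


lemma loopA_cons_cons (w : List String) (a b a2 c : Int) (tl : List (Int × Int))
    (st : List String) (acc : List (Int × Int)) :
    pvLoopA w ((a, b) :: (a2, c) :: tl) st acc
      = pvLoopA w ((a2, c) :: tl)
          ((st ++ pvSpl w a b) ++ PySem.List.slice w (some (b + 1)) (some a2))
          (acc ++ [((st.length : Int), (st.length : Int) + ((pvSpl w a b).length : Int))]) := rfl


lemma loopA_acc (w : List String) : ∀ (ps : List (Int × Int)) (st : List String)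
    (acc : List (Int × Int)),
    pvLoopA w ps st acc = ((pvLoopA w ps st []).1, acc ++ (pvLoopA w ps st []).2) := by
  intro ps
  induction ps with
  | nil => intro st acc; simp [pvLoopA]
  | cons hd tl ih =>
    obtain ⟨a, b⟩ := hd
    cases tl with
    | nil =>
      intro st acc
      rw [loopA_single, loopA_single]
      rfl
    | cons hd2 tl2 =>
      obtain ⟨a2, c⟩ := hd2
      intro st acc
      rw [loopA_cons_cons, loopA_cons_cons w a b a2 c tl2 st [], ih, ih _ ([] ++ [_])]
      simp only [List.nil_append, List.append_assoc]


lemma loopA_prefix (w : List String) : ∀ (ps : List (Int × Int)) (st0 st : List String),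
    pvLoopA w ps (st0 ++ st) [] = (st0 ++ (pvLoopA w ps st []).1,
      pvShift (st0.length : Int) (pvLoopA w ps st []).2) := by
  intro ps
  induction ps with
  | nil => intro st0 st; simp [pvLoopA, pvShift]
  | cons hd tl ih =>
    obtain ⟨a, b⟩ := hd
    cases tl with
    | nil =>
      intro st0 st
      rw [loopA_single, loopA_single]
      simp only [pvShift, List.nil_append, List.map_cons, List.map_nil, Prod.mk.injEq]
      refine ⟨List.append_assoc _ _ _, ?_⟩
      simp only [List.cons.injEq, Prod.mk.injEq, List.length_append, and_true]
      constructor <;> (push_cast; ring)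
    | cons hd2 tl2 =>
      obtain ⟨a2, c⟩ := hd2
      intro st0 st
      rw [loopA_cons_cons, loopA_cons_cons w a b a2 c tl2 st []]
      rw [loopA_acc, show ((st0 ++ st) ++ pvSpl w a b) ++ PySem.List.slice w (some (b+1)) (some a2)
            = st0 ++ ((st ++ pvSpl w a b) ++ PySem.List.slice w (some (b+1)) (some a2)) by simp, ih]
      rw [loopA_acc w ((a2,c)::tl2) ((st ++ pvSpl w a b) ++ _) ([] ++ [_])]
      simp only [pvShift, List.nil_append, List.map_append, List.map_cons, List.map_nil,
        Prod.mk.injEq, List.append_assoc, List.cons.injEq, List.length_append]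
      refine ⟨trivial, ?_⟩
      have hp : (((st0.length + st.length : Nat) : Int), ((st0.length + st.length : Nat) : Int) + ((pvSpl w a b).length : Int))
          = (((st.length : Int) + (st0.length : Int)), (st.length : Int) + ((pvSpl w a b).length : Int) + (st0.length : Int)) := by
        refine Prod.ext ?_ ?_ <;> (push_cast; ring)
      rw [hp]


lemma slice_shift {α : Type} (pre w : List α) (a b : Nat) :
    PySem.List.slice (pre ++ w) (some ((a : Int) + (pre.length : Int) + 1))
        (some ((b : Int) + (pre.length : Int)))
      = PySem.List.slice w (some ((a : Int) + 1)) (some (b : Int)) := by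
  rw [show (a : Int) + (pre.length : Int) + 1 = ((a + pre.length + 1 : Nat) : Int) by push_cast; ring,
    show (b : Int) + (pre.length : Int) = ((b + pre.length : Nat) : Int) by push_cast; ring,
    show (a : Int) + 1 = ((a + 1 : Nat) : Int) by push_cast; ring,
    PySem.List.slice_natCast, PySem.List.slice_natCast, List.drop_append]
  rw [List.drop_eq_nil_of_le (by omega), List.nil_append,
    show a + pre.length + 1 - pre.length = a + 1 by omega,
    show b + pre.length - (a + pre.length + 1) = b - (a + 1) by omega]


lemma pvSpl_shift (pre w : List String) (a b : Nat) :
    pvSpl (pre ++ w) ((a : Int) + (pre.length : Int)) ((b : Int) + (pre.length : Int))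
      = pvSpl w (a : Int) (b : Int) := by
  simp only [pvSpl]
  rw [slice_shift]


lemma loopA_shift (pre w : List String) : ∀ (ps : List (Nat × Nat)) (st : List String)
    (acc : List (Int × Int)),
    pvLoopA (pre ++ w) (ps.map (fun ab => ((ab.1 : Int) + (pre.length : Int),
        (ab.2 : Int) + (pre.length : Int)))) st acc
      = pvLoopA w (ps.map (fun ab => ((ab.1 : Int), (ab.2 : Int)))) st acc := by
  intro ps
  induction ps with
  | nil => intro st acc; rfl
  | cons hd tl ih =>
    obtain ⟨a, b⟩ := hd
    cases tl with
    | nil =>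
      intro st acc
      simp only [List.map_cons, List.map_nil]
      rw [loopA_single, loopA_single, pvSpl_shift]
    | cons hd2 tl2 =>
      obtain ⟨a2, c⟩ := hd2
      intro st acc
      simp only [List.map_cons]
      rw [loopA_cons_cons, loopA_cons_cons, pvSpl_shift]
      have hsl : PySem.List.slice (pre ++ w) (some ((b : Int) + (pre.length : Int) + 1))
          (some ((a2 : Int) + (pre.length : Int))) = PySem.List.slice w (some ((b : Int) + 1)) (some (a2 : Int)) :=
        slice_shift pre w b a2
      rw [hsl]
      exact ih _ _

lemma loopA_shift_cons (pre w : List String) (x : Nat × Nat) (ps : List (Nat × Nat))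
    (st : List String) (acc : List (Int × Int)) :
    pvLoopA (pre ++ w) (((x.1 : Int) + (pre.length : Int), (x.2 : Int) + (pre.length : Int)) ::
        ps.map (fun ab => ((ab.1 : Int) + (pre.length : Int), (ab.2 : Int) + (pre.length : Int)))) st acc
      = pvLoopA w (((x.1 : Int), (x.2 : Int)) ::
        ps.map (fun ab => ((ab.1 : Int), (ab.2 : Int)))) st acc := by
  have h := loopA_shift pre w (x :: ps) st acc
  simpa using h

lemma slice_drop (t : List String) (i : Nat) :
    PySem.List.slice t (some ((i : Int) + 1)) none = t.drop (i + 1) := by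
  rw [show ((i : Int) + 1) = ((i + 1 : Nat) : Int) by push_cast; ring,
    PySem.List.slice_from_natCast]


lemma drop_marker (u t' : List String) :
    (u ++ "[F]" :: t').drop (u.length + 1) = t' := by
  rw [List.drop_append]
  simp


lemma scanB_nomark (t : List String) (h : "[F]" ∉ t) : pvScanB t [] [] = (t, []) := by
  rw [pvScanB.eq_def]
  rw [show PySem.List.index? t "[F]" = none from (PySem.List.index?_eq_none_iff _ _).2 h]
  rfl


lemma scanB_onemark (u t' : List String) (hu : "[F]" ∉ u) (ht : "[F]" ∉ t') :
    pvScanB (u ++ "[F]" :: t') [] [] = (u ++ "[F]" :: t', []) := by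
  rw [pvScanB.eq_def, index?_prefix u t' hu]
  have htail : PySem.List.slice (u ++ "[F]" :: t') (some ((u.length : Int) + 1)) none = t' := by
    rw [show ((u.length : Int) + 1) = ((u.length + 1 : Nat) : Int) by push_cast; ring,
      PySem.List.slice_from_natCast, List.drop_append]
    simp
  simp only [htail]
  rw [show PySem.List.index? t' "[F]" = none from (PySem.List.index?_eq_none_iff _ _).2 ht]
  rfl


lemma scanB_acc : ∀ (n : Nat) (t out : List String) (idx : List (Int × Int)), t.length ≤ n →
    pvScanB t out idx = (out ++ (pvScanB t [] []).1,
      idx ++ pvShift (out.length : Int) (pvScanB t [] []).2) := by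
  intro n
  induction n with
  | zero =>
    intro t out idx hlen
    have : t = [] := List.length_eq_zero_iff.1 (by omega)
    subst this
    simp [pvScanB, pvShift]
  | succ n ih =>
    intro t out idx hlen
    rw [pvScanB.eq_def, pvScanB.eq_def]
    cases h1 : PySem.List.index? t "[F]" with
    | none => simp [pvShift]
    | some i =>
      simp only []
      cases h2 : PySem.List.index? (PySem.List.slice t (some ((i : Int) + 1)) none) "[F]" with
      | none => simp [pvShift]
      | some j =>
        simp only []
        have hmem : "[F]" ∈ t := (PySem.List.index?_isSome_iff t "[F]").1 (by rw [h1]; rfl)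
        have hne : t ≠ [] := by rintro rfl; simp at hmem
        have hlen' : (PySem.List.slice (PySem.List.slice t (some ((i : Int) + 1)) none)
            (some ((j : Int) + 1)) none).length ≤ n := by
          rw [slice_drop, slice_drop]
          have : 0 < t.length := List.length_pos_iff.2 hne
          simp only [List.length_drop]
          omega
        rw [ih _ _ _ hlen', ih _ (([] ++ PySem.List.slice t none (some (i : Int))) ++ _) _ hlen']
        simp only [List.nil_append, List.append_assoc, List.length_append, Prod.mk.injEq]
        refine ⟨trivial, ?_⟩
        congr 1
        simp only [pvShift, List.map_append, List.map_cons, List.map_nil, List.map_map]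
        congr 1
        · simp only [List.cons.injEq, List.map_nil, and_true, Prod.mk.injEq]
          constructor <;> (push_cast; ring)
        · refine List.map_congr_left (fun e _ => ?_)
          simp only [Function.comp_apply, Prod.mk.injEq]
          constructor <;> (push_cast; ring)


lemma scanB_step (u v w : List String) (hu : "[F]" ∉ u) (hv : "[F]" ∉ v) :
    pvScanB (u ++ "[F]" :: (v ++ "[F]" :: w)) [] []
      = (u ++ pvTokOf v ++ (pvScanB w [] []).1,
        ((u.length : Int), (u.length : Int) + ((pvTokOf v).length : Int)) ::
          pvShift ((u.length : Int) + ((pvTokOf v).length : Int)) (pvScanB w [] []).2) := by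
  rw [pvScanB.eq_def, index?_prefix u _ hu]
  simp only [slice_drop, drop_marker]
  rw [index?_prefix v w hv]
  simp only []
  have hpre : PySem.List.slice (u ++ "[F]" :: (v ++ "[F]" :: w)) none (some (u.length : Int)) = u := by
    rw [PySem.List.slice_to_natCast, List.take_append]
    simp
  have hmid : PySem.List.slice (v ++ "[F]" :: w) none (some (v.length : Int)) = v := by
    rw [PySem.List.slice_to_natCast, List.take_append]
    simp
  rw [hpre, hmid]
  simp only [slice_drop, drop_marker]
  rw [scanB_acc w.length w (([] ++ u) ++ _) _ le_rfl]
  simp only [List.nil_append, List.append_assoc, List.length_append, Prod.mk.injEq]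
  refine ⟨rfl, ?_⟩
  rw [show String.ofList (List.take 2 (PySem.Str.join "" v).toList) ::
      List.map (fun c => String.ofList [c]) (List.drop 2 (PySem.Str.join "" v).toList) = pvTokOf v from rfl]
  rw [List.singleton_append, Nat.cast_add]


lemma pvMarks_append (x y : List String) :
    pvMarks (x ++ y) = pvMarks x ++ (pvMarks y).map (· + x.length) := by
  induction x with
  | nil => simp [pvMarks]
  | cons a x ih =>
    by_cases ha : a = "[F]"
    · simp only [List.cons_append, pvMarks, if_pos ha, ih, List.map_append, List.map_map]
      refine congrArg _ (congrArg _ (List.map_congr_left (fun n _ => ?_)))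
      simp [Function.comp]; omega
    · simp only [List.cons_append, pvMarks, if_neg ha, ih, List.map_append, List.map_map]
      refine congrArg _ (List.map_congr_left (fun n _ => ?_))
      simp [Function.comp]; omega

lemma pvMarks_span (u v w : List String) (hu : "[F]" ∉ u) (hv : "[F]" ∉ v) :
    pvMarks (u ++ "[F]" :: (v ++ "[F]" :: w))
      = u.length :: (u.length + 1 + v.length) ::
          (pvMarks w).map (· + (u.length + v.length + 2)) := by
  rw [pvMarks_append, (pvMarks_nil_iff u).2 hu, List.nil_append]
  rw [show ("[F]" :: (v ++ "[F]" :: w)) = ("[F]" :: v) ++ ("[F]" :: w) by simp]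
  rw [pvMarks_append]
  rw [show pvMarks ("[F]" :: v) = 0 :: (pvMarks v).map (· + 1) from by rw [pvMarks]; simp]
  rw [(pvMarks_nil_iff v).2 hv]
  rw [show pvMarks ("[F]" :: w) = 0 :: (pvMarks w).map (· + 1) from by rw [pvMarks]; simp]
  simp only [List.map_nil, List.nil_append, List.map_cons, List.map_map, List.map_append,
    List.cons_append, List.length_cons, List.cons.injEq]
  refine ⟨by omega, by omega, List.map_congr_left (fun n _ => ?_)⟩
  simp [Function.comp]; omega

lemma pvPairsA_span (u v w : List String) (hu : "[F]" ∉ u) (hv : "[F]" ∉ v) :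
    pvPairsA (u ++ "[F]" :: (v ++ "[F]" :: w))
      = ((u.length : Int), ((u.length + 1 + v.length : Nat) : Int)) ::
          (pvPairUp (pvMarks w)).map
            (fun ab => (((ab.1 + (u.length + v.length + 2) : Nat) : Int),
              ((ab.2 + (u.length + v.length + 2) : Nat) : Int))) := by
  rw [pairsA_eq, pvMarks_span u v w hu hv, pvPairUp, pvPairUp_map, List.map_cons, List.map_map]
  rfl

lemma pvACore_nopairs (t : List String) (h : pvPairsA t = []) : pvACore t = (t, []) := by
  unfold pvACore
  rw [h]

lemma pvA_eq_core (text : List String) :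
    char_level_representation_impl text
      = ((pvACore text).1.map PySem.Str.strip, (pvACore text).2) := by
  unfold char_level_representation_impl pvACore
  cases h : pvPairsA text with
  | nil => rfl
  | cons p ps => simp [List.map_append]

lemma getLast_cons_cons_map {α β : Type} [Inhabited β] (e y : β) (f : α → β) (x : α)
    (ps : List α) (hy : y = f x) (hne : (e :: y :: ps.map f) ≠ []) (hne2 : (x :: ps) ≠ []) :
    ((e :: y :: ps.map f).getLast hne) = f ((x :: ps).getLast hne2) := by
  have h1 : (e :: y :: ps.map f).getLast? = some (f ((x :: ps).getLast hne2)) := by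
    rw [List.getLast?_cons_cons, hy, ← List.map_cons, List.getLast?_map]
    rw [List.getLast?_eq_getLast (l := x :: ps) hne2]
    rfl
  rw [List.getLast?_eq_getLast (l := e :: y :: ps.map f) hne] at h1
  exact Option.some.inj h1

lemma getLast_map_cons {α β : Type} [Inhabited β] (y : β) (f : α → β) (x : α)
    (ps : List α) (hy : y = f x) (hne : (y :: ps.map f) ≠ []) (hne2 : (x :: ps) ≠ []) :
    ((y :: ps.map f).getLast hne) = f ((x :: ps).getLast hne2) := by
  have h1 : (y :: ps.map f).getLast? = some (f ((x :: ps).getLast hne2)) := by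
    rw [hy, ← List.map_cons, List.getLast?_map]
    rw [List.getLast?_eq_getLast (l := x :: ps) hne2]
    rfl
  rw [List.getLast?_eq_getLast (l := y :: ps.map f) hne] at h1
  exact Option.some.inj h1

lemma take_marker (u t' : List String) : (u ++ "[F]" :: t').take u.length = u := by
  rw [List.take_append]
  simp

lemma pvSpl_span (u v r : List String) :
    pvSpl (u ++ "[F]" :: (v ++ "[F]" :: r)) (u.length : Int)
        ((u.length + 1 + v.length : Nat) : Int) = pvTokOf v := by
  unfold pvSpl pvTokOf
  have hsl : PySem.List.slice (u ++ "[F]" :: (v ++ "[F]" :: r))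
      (some ((u.length : Int) + 1)) (some ((u.length + 1 + v.length : Nat) : Int))
      = v := by
    rw [show ((u.length : Int) + 1) = ((u.length + 1 : Nat) : Int) by push_cast; ring,
      PySem.List.slice_natCast, drop_marker]
    rw [show u.length + 1 + v.length - (u.length + 1) = v.length by omega, List.take_append]
    simp
  rw [hsl]
  exact tok_collapse _

lemma pvACore_step (u v w : List String) (hu : "[F]" ∉ u) (hv : "[F]" ∉ v) :
    pvACore (u ++ "[F]" :: (v ++ "[F]" :: w))
      = (u ++ pvTokOf v ++ (pvACore w).1,
        ((u.length : Int), (u.length : Int) + ((pvTokOf v).length : Int)) ::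
          pvShift ((u.length : Int) + ((pvTokOf v).length : Int)) (pvACore w).2) := by
  have hpairs := pvPairsA_span u v w hu hv
  have hst0 : PySem.List.slice (u ++ "[F]" :: (v ++ "[F]" :: w)) none (some (u.length : Int))
      = u := by rw [PySem.List.slice_to_natCast, take_marker]
  cases hW : pvPairUp (pvMarks w) with
  | nil =>
    have hpw : pvPairsA w = [] := by rw [pairsA_eq, hW]; rfl
    rw [pvACore_nopairs w hpw]
    unfold pvACore
    rw [hpairs, hW]
    simp only [List.map_nil]
    rw [loopA_single, hst0, pvSpl_span]
    have hlast : (([((u.length : Int), ((u.length + 1 + v.length : Nat) : Int))]).getLast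
        (by simp)) = ((u.length : Int), ((u.length + 1 + v.length : Nat) : Int)) := rfl
    rw [hlast]
    have hfin : PySem.List.slice (u ++ "[F]" :: (v ++ "[F]" :: w))
        (some (((u.length + 1 + v.length : Nat) : Int) + 1)) none = w := by
      rw [show (((u.length + 1 + v.length : Nat) : Int) + 1)
          = ((u.length + 1 + v.length + 1 : Nat) : Int) by push_cast; ring,
        PySem.List.slice_from_natCast,
        show u ++ "[F]" :: (v ++ "[F]" :: w) = (u ++ "[F]" :: (v ++ ["[F]"])) ++ w by simp,
        show u.length + 1 + v.length + 1 = (u ++ "[F]" :: (v ++ ["[F]"])).length by simp; omega,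
        List.drop_left]
    rw [hfin]
    simp [pvShift]
  | cons AB PS =>
    obtain ⟨A, B⟩ := AB
    have hpw : pvPairsA w = ((A : Int), (B : Int)) ::
        PS.map (fun ab => ((ab.1 : Int), (ab.2 : Int))) := by
      rw [pairsA_eq, hW]; rfl
    have hAw : pvACore w
        = ((pvLoopA w (((A : Int), (B : Int)) :: PS.map (fun ab => ((ab.1 : Int), (ab.2 : Int))))
              (PySem.List.slice w none (some (A : Int))) []).1
            ++ PySem.List.slice w
              (some ((((((A : Int), (B : Int)) :: PS.map (fun ab => ((ab.1 : Int), (ab.2 : Int)))).getLast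
                  (by simp)).2) + 1)) none,
          (pvLoopA w (((A : Int), (B : Int)) :: PS.map (fun ab => ((ab.1 : Int), (ab.2 : Int))))
              (PySem.List.slice w none (some (A : Int))) []).2) := by
      unfold pvACore
      rw [hpw]
    rw [hAw]
    unfold pvACore
    rw [hpairs, hW]
    simp only [List.map_cons]
    rw [loopA_cons_cons, hst0, pvSpl_span]
    -- rewrite the between-slice to w.take A
    have hba : PySem.List.slice (u ++ "[F]" :: (v ++ "[F]" :: w))
        (some (((u.length + 1 + v.length : Nat) : Int) + 1))
        (some ((A + (u.length + v.length + 2) : Nat) : Int)) = w.take A := by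
      rw [show (((u.length + 1 + v.length : Nat) : Int) + 1)
          = ((u.length + 1 + v.length + 1 : Nat) : Int) by push_cast; ring,
        PySem.List.slice_natCast,
        show u ++ "[F]" :: (v ++ "[F]" :: w) = (u ++ "[F]" :: (v ++ ["[F]"])) ++ w by simp,
        show u.length + 1 + v.length + 1 = (u ++ "[F]" :: (v ++ ["[F]"])).length by simp; omega,
        List.drop_left,
        show A + (u.length + v.length + 2) - (u ++ "[F]" :: (v ++ ["[F]"])).length = A by
          simp; omega]
    rw [hba]
    -- turn the shifted tail pairs into loopA_shift's canonical form
    have hmap : PS.map (fun ab => (((ab.1 + (u.length + v.length + 2) : Nat) : Int),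
          ((ab.2 + (u.length + v.length + 2) : Nat) : Int)))
        = PS.map (fun ab => ((ab.1 : Int) + ((u ++ "[F]" :: (v ++ ["[F]"])).length : Int),
          (ab.2 : Int) + ((u ++ "[F]" :: (v ++ ["[F]"])).length : Int))) := by
      refine List.map_congr_left (fun ab _ => ?_)
      have : ((u ++ "[F]" :: (v ++ ["[F]"])).length : Int) = ((u.length + v.length + 2 : Nat) : Int) := by
        simp; push_cast; ring
      rw [this]
      refine Prod.ext ?_ ?_ <;> (push_cast; ring)
    have hABK : (((A + (u.length + v.length + 2) : Nat) : Int),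
          ((B + (u.length + v.length + 2) : Nat) : Int))
        = ((A : Int) + ((u ++ "[F]" :: (v ++ ["[F]"])).length : Int),
          (B : Int) + ((u ++ "[F]" :: (v ++ ["[F]"])).length : Int)) := by
      have : ((u ++ "[F]" :: (v ++ ["[F]"])).length : Int) = ((u.length + v.length + 2 : Nat) : Int) := by
        simp; push_cast; ring
      rw [this]
      refine Prod.ext ?_ ?_ <;> (push_cast; ring)
    -- resolve the getLast of the pair list via getLast?
    rw [getLast_cons_cons_map _ _
      (fun ab : Nat × Nat => (((ab.1 + (u.length + v.length + 2) : Nat) : Int),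
        ((ab.2 + (u.length + v.length + 2) : Nat) : Int)) )
      (A, B) PS rfl (by simp) (by simp)]
    simp only []
    have hfin2 : PySem.List.slice (u ++ "[F]" :: (v ++ "[F]" :: w))
        (some (((((((A, B) :: PS).getLast (by simp)).2 + (u.length + v.length + 2) : Nat)) : Int) + 1)) none
        = w.drop ((((A, B) :: PS).getLast (by simp)).2 + 1) := by
      rw [show (((((((A, B) :: PS).getLast (by simp)).2 + (u.length + v.length + 2) : Nat)) : Int) + 1)
          = (((((A, B) :: PS).getLast (by simp)).2 + (u.length + v.length + 2) + 1 : Nat) : Int) by push_cast; ring,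
        PySem.List.slice_from_natCast,
        show u ++ "[F]" :: (v ++ "[F]" :: w) = (u ++ "[F]" :: (v ++ ["[F]"])) ++ w by simp,
        List.drop_append, List.drop_eq_nil_of_le (by simp; omega), List.nil_append,
        show (((A, B) :: PS).getLast (by simp)).2 + (u.length + v.length + 2) + 1
            - (u ++ "[F]" :: (v ++ ["[F]"])).length
          = (((A, B) :: PS).getLast (by simp)).2 + 1 from by simp; omega]
    rw [hfin2, hABK, hmap,
      show u ++ "[F]" :: (v ++ "[F]" :: w) = (u ++ "[F]" :: (v ++ ["[F]"])) ++ w by simp,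
      loopA_shift_cons (u ++ "[F]" :: (v ++ ["[F]"])) w (A, B) PS]
    rw [getLast_map_cons ((A : Int), (B : Int))
      (fun ab : Nat × Nat => ((ab.1 : Int), (ab.2 : Int))) (A, B) PS rfl (by simp) (by simp)]
    simp only []
    have hstw : PySem.List.slice w none (some (A : Int)) = w.take A := PySem.List.slice_to_natCast w A
    have hfinw : PySem.List.slice w (some ((((((A, B) :: PS).getLast (by simp)).2 : Nat) : Int) + 1)) none
        = w.drop ((((A, B) :: PS).getLast (by simp)).2 + 1) := slice_drop w _
    rw [hstw, hfinw]
    rw [loopA_acc w _ _ ([] ++ [((u.length : Int), (u.length : Int) + ((pvTokOf v).length : Int))]),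
      loopA_prefix w _ (u ++ pvTokOf v) (List.take A w)]
    simp only [List.nil_append, List.append_assoc, List.singleton_append, Prod.mk.injEq]
    refine ⟨trivial, ?_⟩
    rw [show ((u ++ pvTokOf v).length : Int) = (u.length : Int) + ((pvTokOf v).length : Int) by
      rw [List.length_append]; push_cast; ring]



lemma pvB_eq_core (text : List String) :
    char_level_representation_impl_alt text = ((pvScanB text [] []).1.map PySem.Str.strip, (pvScanB text [] []).2) := by
  rfl

lemma pvCore_main_aux : ∀ (n : Nat) (t : List String), t.length ≤ n →
    pvACore t = pvScanB t [] [] := by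
  intro n
  induction n with
  | zero =>
    intro t hlen
    have ht : t = [] := List.length_eq_zero_iff.1 (by omega)
    subst ht
    rw [pvACore_nopairs [] rfl, scanB_nomark [] (by simp)]
  | succ n ih =>
    intro t hlen
    cases hm : pvMarks t with
    | nil =>
      have hnot : "[F]" ∉ t := (pvMarks_nil_iff t).1 hm
      rw [pvACore_nopairs t (by rw [pairsA_eq, hm]; rfl), scanB_nomark t hnot]
    | cons p m =>
      obtain ⟨u, t', ht, hu, hlenu, hmrel⟩ := pvMarks_decomp t p m hm
      cases hm2 : pvMarks t' with
      | nil =>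
        have hnot' : "[F]" ∉ t' := (pvMarks_nil_iff t').1 hm2
        have hpairs0 : pvPairsA t = [] := by
          rw [pairsA_eq, hm, hmrel, hm2]
          rfl
        rw [pvACore_nopairs t hpairs0, ht, scanB_onemark u t' hu hnot']
      | cons q' m' =>
        obtain ⟨v, w, ht', hv, hlenv, hmrel'⟩ := pvMarks_decomp t' q' m' hm2
        have hw : w.length ≤ n := by
          have : t.length = u.length + 1 + (v.length + 1 + w.length) := by
            rw [ht, ht']
            simp
            omega
          omega
        rw [ht, ht', pvACore_step u v w hu hv, scanB_step u v w hu hv, ih w hw]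

lemma pvCore_main (text : List String) : pvACore text = pvScanB text [] [] :=
  pvCore_main_aux text.length text le_rfl

-- ===== VERDICT (by name: the statement is the Claim_ definition above) =====
theorem char_level_representation_impl_spec : Claim_equal_char_level_representation_impl := by
  intro text _
  show char_level_representation_impl text = char_level_representation_impl_alt text
  rw [pvA_eq_core, pvB_eq_core, pvCore_main]
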